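-- pv_equiv track=rewrite | github.com/Felerius/findminhs | data/calc_stats.py | lower_sum_degrees
-- ===== SOURCE A (Python) =====
-- def degrees(inst):
--     deg = {}
--     for edge in inst:
--         for node in edge:
--             deg[node] = deg[node]+1 if node in deg else 1
--     return deg
--
-- def lower_sum_degrees(inst):
--     deg = degrees(inst)
--     edges = len(inst)
--     res = 0
--     covered = 0
--     for d in sorted(deg.values(), reverse=True):
--         if covered < edges:
--             res += 1
--             covered += d
--     return res
-- ===== SOURCE B (Python) =====
-- def lower_sum_degrees(inst):
--     deg = {}
--     for node in (n for e in inst for n in e):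
--         deg[node] = deg.get(node, 0) + 1
--     hist = {}
--     for d in deg.values():
--         hist[d] = hist.get(d, 0) + 1
--     maxd = 0
--     for d in deg.values():
--         if d > maxd:
--             maxd = d
--     edges = len(inst)
--     res = 0
--     covered = 0
--     d = maxd
--     while d > 0:
--         for _ in range(hist.get(d, 0)):
--             if covered < edges:
--                 res += 1
--                 covered += d
--         d -= 1
--     return res
-- ===== Notes on version B (the rewrite author's own statement) =====
-- stated objective: alternative
-- what changed: Replaces the comparison sort of the degree multiset by a counting-sort style bucket scan: a histogram of degree values is built and degrees are consumed from the maximum degree downward, one node per histogram count, so no sorted() call is needed.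
import Mathlib
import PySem

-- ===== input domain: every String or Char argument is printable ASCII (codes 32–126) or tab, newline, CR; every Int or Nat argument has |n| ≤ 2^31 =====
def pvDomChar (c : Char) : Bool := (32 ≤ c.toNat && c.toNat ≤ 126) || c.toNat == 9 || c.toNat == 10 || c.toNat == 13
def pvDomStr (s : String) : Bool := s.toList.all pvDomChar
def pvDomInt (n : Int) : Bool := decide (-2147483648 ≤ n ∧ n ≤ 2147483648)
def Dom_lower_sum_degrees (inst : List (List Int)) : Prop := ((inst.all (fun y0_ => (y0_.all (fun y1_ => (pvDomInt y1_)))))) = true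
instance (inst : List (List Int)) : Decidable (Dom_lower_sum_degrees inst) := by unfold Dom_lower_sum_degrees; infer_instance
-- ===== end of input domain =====

-- B replaces the comparison sort of the degree multiset by a counting-sort style
-- bucket scan over degree values (histogram + downward walk from the maximum degree).

-- ===== PORT A =====
def pvDegrees (inst : List (List Int)) : PySem.Dict Int Int :=
  inst.foldl (fun deg edge =>
      edge.foldl (fun deg node =>
        deg.insert node (if deg.contains node then deg.getD node 0 + 1 else 1)) deg)
    PySem.Dict.empty

def lower_sum_degrees (inst : List (List Int)) : Int :=
  let deg := pvDegrees inst
  let edges : Int := inst.length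
  let r := (PySem.List.sorted deg.values (fun x => x) true).foldl
      (fun (s : Int × Int) d => if s.2 < edges then (s.1 + 1, s.2 + d) else s)
      ((0 : Int), (0 : Int))
  r.1

-- ===== PORT B =====
-- the `while d > 0: … ; d -= 1` loop of Source B, with d running k, k-1, …, 1;
-- the inner `for _ in range(hist.get(d, 0))` is a fold over `replicate` copies of d
def pvAltBucket (hist : PySem.Dict Int Int) (edges : Int) : Nat → (Int × Int) → (Int × Int)
  | 0, s => s
  | k+1, s =>
      pvAltBucket hist edges k
        ((List.replicate (hist.getD ((k+1 : Nat) : Int) 0).toNat ((k+1 : Nat) : Int)).foldl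
          (fun s d => if s.2 < edges then (s.1 + 1, s.2 + d) else s) s)

def lower_sum_degrees_alt (inst : List (List Int)) : Int :=
  let deg := (inst.flatMap id).foldl (fun d x => d.insert x (d.getD x 0 + 1)) PySem.Dict.empty
  let hist := deg.values.foldl (fun h d => h.insert d (h.getD d 0 + 1)) PySem.Dict.empty
  let maxd := deg.values.foldl (fun m d => if d > m then d else m) (0 : Int)
  let edges : Int := inst.length
  (pvAltBucket hist edges maxd.toNat ((0 : Int), (0 : Int))).1

-- ===== PRECONDITION & SPEC =====
def Spec_lower_sum_degrees (inst : List (List Int)) (out : Int) : Prop := out = lower_sum_degrees_alt inst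
instance (inst : List (List Int)) (out : Int) : Decidable (Spec_lower_sum_degrees inst out) := by unfold Spec_lower_sum_degrees; infer_instance

-- ===== CLAIM (what is proved, stated in full; the proofs are below) =====
def Claim_equal_lower_sum_degrees : Prop := ∀ (inst : List (List Int)), Dom_lower_sum_degrees inst → Spec_lower_sum_degrees inst (lower_sum_degrees inst)

-- ===== LEMMAS AND PROOFS =====

-- proof-only: the list of degree values produced by B's downward bucket walk
def pvDesc (c : Int → Nat) : Nat → List Int
  | 0 => []
  | k+1 => List.replicate (c ((k+1 : Nat) : Int)) ((k+1 : Nat) : Int) ++ pvDesc c k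

lemma pv_foldl_foldl {α σ : Type} (f : σ → α → σ) :
    ∀ (l : List (List α)) (s : σ),
      l.foldl (fun s e => e.foldl f s) s = (l.flatMap id).foldl f s := by
  intro l
  induction l with
  | nil => intro s; rfl
  | cons e t ih => intro s; simp [List.foldl_append, ih]

lemma pv_degA_step (d : PySem.Dict Int Int) (x : Int) :
    d.insert x (if d.contains x then d.getD x 0 + 1 else 1) = d.insert x (d.getD x 0 + 1) := by
  cases h : d.contains x with
  | true => simp
  | false =>
      have h0 : d.getD x 0 = 0 := PySem.Dict.getD_of_not_contains d 0 h
      simp [h0]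

lemma pv_degA_eq_counter (inst : List (List Int)) :
    pvDegrees inst = PySem.Dict.counter (inst.flatMap id) := by
  have hstep : (fun (d : PySem.Dict Int Int) (x : Int) =>
        d.insert x (if d.contains x then d.getD x 0 + 1 else 1))
      = (fun (d : PySem.Dict Int Int) (x : Int) => d.insert x (d.getD x 0 + 1)) := by
    funext d x; exact pv_degA_step d x
  unfold pvDegrees
  rw [hstep, pv_foldl_foldl]
  exact PySem.Dict.foldl_insert_getD_add_one_eq_counter _

lemma pv_bucket_eq_foldl (hist : PySem.Dict Int Int) (edges : Int) :
    ∀ (k : Nat) (s : Int × Int),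
      pvAltBucket hist edges k s =
        (pvDesc (fun d => (hist.getD d 0).toNat) k).foldl
          (fun s d => if s.2 < edges then (s.1 + 1, s.2 + d) else s) s := by
  intro k
  induction k with
  | zero => intro s; rfl
  | succ k ih => intro s; simp only [pvAltBucket, pvDesc, List.foldl_append, ih]

lemma pv_count_pvDesc (c : Int → Nat) (x : Int) :
    ∀ k : Nat, (pvDesc c k).count x = if 1 ≤ x ∧ x ≤ (k : Int) then c x else 0 := by
  intro k
  induction k with
  | zero =>
      simp only [pvDesc, List.count_nil, Nat.cast_zero]
      split_ifs with h
      · exfalso; omega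
      · rfl
  | succ k ih =>
      simp only [pvDesc, List.count_append, List.count_replicate, beq_iff_eq, ih]
      by_cases hx : ((k + 1 : Nat) : Int) = x
      · rw [if_pos hx,
          if_neg (show ¬(1 ≤ x ∧ x ≤ (k : Int)) by push_cast at hx ⊢; omega),
          if_pos (show 1 ≤ x ∧ x ≤ ((k + 1 : Nat) : Int) by push_cast at hx ⊢; omega),
          hx]
        omega
      · rw [if_neg hx]
        have hiff : (1 ≤ x ∧ x ≤ (k : Int)) = (1 ≤ x ∧ x ≤ ((k + 1 : Nat) : Int)) := by
          apply propext; push_cast at hx ⊢; constructor <;> (intro hh; omega)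
        simp only [Nat.zero_add, hiff]

lemma pv_mem_pvDesc (c : Int → Nat) :
    ∀ (k : Nat) (x : Int), x ∈ pvDesc c k → 1 ≤ x ∧ x ≤ (k : Int) := by
  intro k
  induction k with
  | zero => intro x hx; simp [pvDesc] at hx
  | succ k ih =>
      intro x hx
      rcases List.mem_append.1 hx with h | h
      · have := List.eq_of_mem_replicate h
        subst this; push_cast; omega
      · have := ih x h; push_cast at this ⊢; omega

lemma pv_pairwise_pvDesc (c : Int → Nat) :
    ∀ k : Nat, (pvDesc c k).Pairwise (fun a b => b ≤ a) := by
  intro k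
  induction k with
  | zero => exact List.Pairwise.nil
  | succ k ih =>
      refine List.pairwise_append.2 ⟨List.pairwise_replicate.2 (Or.inr le_rfl), ih, ?_⟩
      intro a ha b hb
      have ha' := List.eq_of_mem_replicate ha
      have hb' := pv_mem_pvDesc c k b hb
      subst ha'; push_cast at hb' ⊢; omega

lemma pv_foldl_max_le (l : List Int) :
    ∀ m : Int, m ≤ l.foldl (fun m d => if d > m then d else m) m := by
  induction l with
  | nil => intro m; simp
  | cons x t ih =>
      intro m
      have h1 : m ≤ (if x > m then x else m) := by split <;> omega
      exact le_trans h1 (ih _)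

lemma pv_foldl_max_ge (l : List Int) :
    ∀ (m : Int) (x : Int), x ∈ l → x ≤ l.foldl (fun m d => if d > m then d else m) m := by
  induction l with
  | nil => intro m x hx; simp at hx
  | cons y t ih =>
      intro m x hx
      rcases List.mem_cons.1 hx with rfl | h
      · have h1 : x ≤ (if x > m then x else m) := by split <;> omega
        exact le_trans h1 (pv_foldl_max_le t _)
      · exact ih _ x h

lemma pv_vals_pos (ns : List Int) :
    ∀ v ∈ (PySem.Dict.counter ns).values, 1 ≤ v := by
  intro v hv
  have hval : (PySem.Dict.counter ns).values
      = (PySem.Set.ofList ns).map (fun k => ((ns.count k : Int))) := by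
    simp [PySem.Dict.values, PySem.Dict.items_counter, List.map_map, Function.comp]
  rw [hval] at hv
  rcases List.mem_map.1 hv with ⟨k, hk, rfl⟩
  have hmem : k ∈ ns := by simpa [PySem.Set.mem_ofList] using hk
  have hpos : 0 < ns.count k := List.count_pos_iff.2 hmem
  exact_mod_cast hpos

lemma pv_perm_pvDesc (vals : List Int) (k : Nat)
    (hpos : ∀ v ∈ vals, 1 ≤ v) (hle : ∀ v ∈ vals, v ≤ (k : Int)) :
    (pvDesc (fun d => vals.count d) k).Perm vals := by
  rw [List.perm_iff_count]
  intro a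
  rw [pv_count_pvDesc]
  split_ifs with h
  · rfl
  · symm
    rw [List.count_eq_zero]
    intro ha
    exact h ⟨hpos a ha, hle a ha⟩

lemma pv_sorted_eq_pvDesc (vals : List Int) (k : Nat)
    (hpos : ∀ v ∈ vals, 1 ≤ v) (hle : ∀ v ∈ vals, v ≤ (k : Int)) :
    PySem.List.sorted vals (fun x => x) true = pvDesc (fun d => vals.count d) k := by
  have hperm : (PySem.List.sorted vals (fun x => x) true).Perm
      (pvDesc (fun d => vals.count d) k) :=
    (PySem.List.sorted_perm vals _ true).trans (pv_perm_pvDesc vals k hpos hle).symm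
  have h1 : (PySem.List.sorted vals (fun x => x) true).Pairwise (fun a b => b ≤ a) :=
    PySem.List.sorted_pairwise_rev vals (fun x => x)
  have h2 := pv_pairwise_pvDesc (fun d => vals.count d) k
  have hrev := PySem.List.eq_of_perm_of_pairwise_le_of_injective
      (l₁ := (PySem.List.sorted vals (fun x => x) true).reverse)
      (l₂ := (pvDesc (fun d => vals.count d) k).reverse)
      (fun x : Int => x) (fun a b h => h)
      (((PySem.List.sorted vals (fun x => x) true).reverse_perm).trans
        (hperm.trans ((pvDesc (fun d => vals.count d) k).reverse_perm).symm))
      (List.pairwise_reverse.2 h1) (List.pairwise_reverse.2 h2)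
  exact List.reverse_inj.1 hrev

-- ===== VERDICT (by name: the statement is the Claim_ definition above) =====
theorem lower_sum_degrees_spec : Claim_equal_lower_sum_degrees := by
  intro inst _
  unfold Spec_lower_sum_degrees lower_sum_degrees lower_sum_degrees_alt
  simp only [pv_degA_eq_counter, PySem.Dict.foldl_insert_getD_add_one_eq_counter]
  set ns := inst.flatMap id with hns
  set vals := (PySem.Dict.counter ns).values with hvals
  set maxd := vals.foldl (fun m d => if d > m then d else m) (0 : Int) with hmaxd
  have hmnn : (0 : Int) ≤ maxd := pv_foldl_max_le vals 0
  have hcast : ((maxd.toNat : Nat) : Int) = maxd := Int.toNat_of_nonneg hmnn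
  have hpos : ∀ v ∈ vals, 1 ≤ v := pv_vals_pos ns
  have hle : ∀ v ∈ vals, v ≤ ((maxd.toNat : Nat) : Int) := by
    intro v hv; rw [hcast]; exact pv_foldl_max_ge vals 0 v hv
  have hc : (fun d => ((PySem.Dict.counter vals).getD d 0).toNat)
      = (fun d => vals.count d) := by
    funext d; rw [PySem.Dict.getD_counter]; exact Int.toNat_natCast _
  rw [pv_bucket_eq_foldl, hc, pv_sorted_eq_pvDesc vals maxd.toNat hpos hle]
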